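-- pv_equiv track=rewrite | github.com/kseniiia17/P-A-D | onelab/Lab1.py | algoritm1
-- ===== SOURCE A (Python) =====
-- def algoritm1(nums_al):
--     cnt = 0
--     j = 0
--     i = 0
--     while i < len(nums_al):
--         if i >= len(nums_al): return nums_al
--         cnt = 0
--         if nums_al[i]%2 == 0:
--             cnt = 0
--             i += 1
--             continue
--         elif nums_al[i]%2 != 0:
--             j = i
--             while j < len(nums_al):
--                 if nums_al[j] % 2 != 0:
--                     cnt += 1
--                 else:
--                     break
--                 j += 1
--             if cnt == 1:
--                 del nums_al[i]
--             elif cnt == 2: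
--                 del nums_al[i]
--                 del nums_al[i]
--             elif cnt > 2:
--                 i += cnt
--     return nums_al
-- ===== SOURCE B (Python) =====
-- def algoritm1(nums_al):
--     res = []
--     i = 0
--     n = len(nums_al)
--     while i < n:
--         if nums_al[i] % 2 == 0:
--             res.append(nums_al[i])
--             i += 1
--         else:
--             j = i
--             while j < n and nums_al[j] % 2 != 0:
--                 j += 1
--             if j - i > 2:
--                 res.extend(nums_al[i:j])
--             i = j
--     nums_al[:] = res
--     return nums_al
-- ===== Notes on version B (the rewrite author's own statement) =====
-- stated objective: faster
-- what changed: A repeatedly deletes 1- and 2-element odd runs in place (each del shifts the list's tail); B makes one left-to-right pass that groups consecutive odd runs and copies to the output every even element and every odd run longer than 2.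
import Mathlib
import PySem

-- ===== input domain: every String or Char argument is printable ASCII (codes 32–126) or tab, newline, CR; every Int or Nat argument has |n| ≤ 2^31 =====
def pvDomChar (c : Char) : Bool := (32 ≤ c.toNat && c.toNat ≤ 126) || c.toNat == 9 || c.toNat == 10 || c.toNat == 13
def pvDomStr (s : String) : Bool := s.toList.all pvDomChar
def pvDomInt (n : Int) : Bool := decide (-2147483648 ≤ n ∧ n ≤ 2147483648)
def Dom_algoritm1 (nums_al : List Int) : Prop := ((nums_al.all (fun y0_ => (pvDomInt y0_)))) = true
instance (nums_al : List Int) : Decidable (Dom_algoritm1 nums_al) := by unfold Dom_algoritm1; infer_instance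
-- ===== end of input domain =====

-- B replaces A's delete-in-place rescanning loop by one left-to-right pass that groups
-- consecutive odd runs and keeps evens plus runs longer than 2 (same return value; A mutates
-- its argument in place and B performs the same final mutation via nums_al[:] = res; the
-- equivalence proved here is about the return value).
-- Both loop ports take a fuel argument (called with enough fuel for every iteration the
-- Python loop performs) purely to make the recursion structural; it guards nothing else.

-- shared parity test: Python 'x % 2 != 0'
def pyOdd (x : Int) : Bool := PySem.Int.mod x 2 != 0

-- ===== PORT A =====
-- inner while: counts the consecutive odd elements starting at j
def oddRunA : Nat → List Int → Nat → Nat → Nat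
  | 0, _, _, cnt => cnt
  | fuel + 1, l, j, cnt =>
    if h : j < l.length then
      if pyOdd l[j] then oddRunA fuel l (j + 1) (cnt + 1) else cnt
    else cnt

-- outer while over index i, deleting in place (del nums_al[i])
def algoLoopA : Nat → List Int → Nat → List Int
  | 0, l, _ => l
  | fuel + 1, l, i =>
    if h : i < l.length then
      if pyOdd l[i] then
        let cnt := oddRunA l.length l i 0
        if cnt = 1 then algoLoopA fuel (l.eraseIdx i) i
        else if cnt = 2 then algoLoopA fuel ((l.eraseIdx i).eraseIdx i) i
        else if 2 < cnt then algoLoopA fuel l (i + cnt)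
        else l  -- unreachable: cnt ≥ 1 since nums_al[i] is odd (Python would loop forever here)
      else algoLoopA fuel l (i + 1)
    else l

def algoritm1 (nums_al : List Int) : List Int := algoLoopA (nums_al.length + 1) nums_al 0

-- ===== PORT B =====
-- inner while of B: first index ≥ j that is past the end or holds an even element
def scanEndB : Nat → List Int → Nat → Nat
  | 0, _, j => j
  | fuel + 1, l, j =>
    if h : j < l.length then
      if pyOdd l[j] then scanEndB fuel l (j + 1) else j
    else j

-- outer while of B: build res left to right, appending evens and odd runs of length > 2
def altLoopB : Nat → List Int → Nat → List Int → List Int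
  | 0, _, _, res => res
  | fuel + 1, l, i, res =>
    if h : i < l.length then
      if pyOdd l[i] then
        let j := scanEndB l.length l i
        altLoopB fuel l j
          (if 2 < j - i then res ++ PySem.List.slice l (some (i : Int)) (some (j : Int)) else res)
      else altLoopB fuel l (i + 1) (res ++ [l[i]])
    else res

def algoritm1_alt (nums_al : List Int) : List Int := altLoopB (nums_al.length + 1) nums_al 0 []

-- ===== PRECONDITION & SPEC =====
def Spec_algoritm1 (nums_al : List Int) (out : List Int) : Prop := out = algoritm1_alt nums_al
instance (nums_al : List Int) (out : List Int) : Decidable (Spec_algoritm1 nums_al out) := by unfold Spec_algoritm1; infer_instance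

-- ===== CLAIM (what is proved, stated in full; the proofs are below) =====
def Claim_equal_algoritm1 : Prop := ∀ (nums_al : List Int), Dom_algoritm1 nums_al → Spec_algoritm1 nums_al (algoritm1 nums_al)

-- ===== LEMMAS AND PROOFS =====

-- pure characterisation of the common result: keep evens and odd runs of length > 2
def keep : List Int → List Int
  | [] => []
  | x :: xs =>
    if pyOdd x then
      (if 2 < (x :: List.takeWhile pyOdd xs).length then x :: List.takeWhile pyOdd xs else [])
        ++ keep (List.dropWhile pyOdd xs)
    else x :: keep xs
termination_by l => l.length
decreasing_by
  · have := (List.dropWhile_suffix (p := pyOdd) (l := xs)).length_le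
    simpa using Nat.lt_succ_of_le this
  · simp

theorem drop_length_takeWhile {α : Type} (p : α → Bool) (l : List α) :
    l.drop (l.takeWhile p).length = l.dropWhile p := by
  induction l with
  | nil => simp
  | cons x xs ih =>
    by_cases h : p x
    · simp [h, ih]
    · simp [h]

theorem take_length_takeWhile {α : Type} (p : α → Bool) (l : List α) :
    l.take (l.takeWhile p).length = l.takeWhile p := by
  induction l with
  | nil => simp
  | cons x xs ih =>
    by_cases h : p x
    · simp [h, ih]
    · simp [h]

theorem twlen_cons (l : List Int) (j : Nat) (h : j < l.length) (hodd : pyOdd l[j]) :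
    ((l.drop j).takeWhile pyOdd).length = 1 + ((l.drop (j + 1)).takeWhile pyOdd).length := by
  rw [List.drop_eq_getElem_cons h, List.takeWhile_cons]
  simp [hodd]
  omega

theorem twlen_zero (l : List Int) (j : Nat) (h : j < l.length) (hodd : ¬ pyOdd l[j]) :
    ((l.drop j).takeWhile pyOdd).length = 0 := by
  rw [List.drop_eq_getElem_cons h, List.takeWhile_cons]
  simp [hodd]

theorem oddRunA_eq (fuel : Nat) : ∀ (l : List Int) (j cnt : Nat), l.length ≤ j + fuel →
    oddRunA fuel l j cnt = cnt + ((l.drop j).takeWhile pyOdd).length := by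
  induction fuel with
  | zero =>
    intro l j cnt hf
    rw [oddRunA, List.drop_eq_nil_iff.mpr (by omega)]
    simp
  | succ fuel ih =>
    intro l j cnt hf
    rw [oddRunA]
    by_cases h : j < l.length
    · rw [dif_pos h]
      by_cases hodd : pyOdd l[j]
      · rw [if_pos hodd, twlen_cons l j h hodd, ih l (j + 1) (cnt + 1) (by omega)]
        omega
      · rw [if_neg hodd, twlen_zero l j h hodd]
        omega
    · rw [dif_neg h, List.drop_eq_nil_iff.mpr (by omega)]
      simp

theorem scanEndB_eq (fuel : Nat) : ∀ (l : List Int) (j : Nat), l.length ≤ j + fuel →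
    scanEndB fuel l j = j + ((l.drop j).takeWhile pyOdd).length := by
  induction fuel with
  | zero =>
    intro l j hf
    rw [scanEndB, List.drop_eq_nil_iff.mpr (by omega)]
    simp
  | succ fuel ih =>
    intro l j hf
    rw [scanEndB]
    by_cases h : j < l.length
    · rw [dif_pos h]
      by_cases hodd : pyOdd l[j]
      · rw [if_pos hodd, twlen_cons l j h hodd, ih l (j + 1) (by omega)]
        omega
      · rw [if_neg hodd, twlen_zero l j h hodd]
        omega
    · rw [dif_neg h, List.drop_eq_nil_iff.mpr (by omega)]
      simp

theorem twlen_pos (l : List Int) (i : Nat) (h : i < l.length) (hodd : pyOdd l[i]) :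
    1 ≤ ((l.drop i).takeWhile pyOdd).length ∧
      ((l.drop i).takeWhile pyOdd).length ≤ l.length - i := by
  constructor
  · rw [List.drop_eq_getElem_cons h, List.takeWhile_cons]
    simp [hodd]
  · have := (List.takeWhile_prefix (p := pyOdd) (l := l.drop i)).length_le
    simpa using this

-- unfolding of keep at an odd head, phrased over drop i l
theorem keep_drop_odd (l : List Int) (i : Nat) (h : i < l.length) (hodd : pyOdd l[i]) :
    keep (l.drop i) =
      (if 2 < ((l.drop i).takeWhile pyOdd).length then (l.drop i).takeWhile pyOdd else [])
        ++ keep (l.drop (i + ((l.drop i).takeWhile pyOdd).length)) := by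
  have hd : l.drop i = l[i] :: l.drop (i + 1) := List.drop_eq_getElem_cons h
  have hrest : List.dropWhile pyOdd (l.drop (i + 1)) =
      l.drop (i + 1 + (List.takeWhile pyOdd (l.drop (i + 1))).length) := by
    rw [← drop_length_takeWhile pyOdd (l.drop (i + 1)), List.drop_drop]
  have htw : (l.drop i).takeWhile pyOdd = l[i] :: (l.drop (i + 1)).takeWhile pyOdd := by
    rw [hd, List.takeWhile_cons]; simp [hodd]
  conv_lhs => rw [hd, keep]
  rw [htw, hrest]
  simp only [hodd, if_true, List.length_cons]
  have hidx : i + ((List.takeWhile pyOdd (List.drop (i + 1) l)).length + 1)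
      = i + 1 + (List.takeWhile pyOdd (List.drop (i + 1) l)).length := by omega
  rw [hidx]

theorem algoLoopA_eq (fuel : Nat) : ∀ (l : List Int) (i : Nat),
    i ≤ l.length → l.length ≤ i + fuel →
    algoLoopA fuel l i = l.take i ++ keep (l.drop i) := by
  induction fuel with
  | zero =>
    intro l i hle hf
    have hi : i = l.length := by omega
    subst hi
    rw [algoLoopA, List.drop_eq_nil_iff.mpr (le_refl _), keep]
    simp
  | succ fuel ih =>
    intro l i hle hf
    rw [algoLoopA]
    by_cases h : i < l.length
    · rw [dif_pos h]
      by_cases hodd : pyOdd l[i]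
      · rw [if_pos hodd]
        have hc : oddRunA l.length l i 0 = ((l.drop i).takeWhile pyOdd).length := by
          rw [oddRunA_eq l.length l i 0 (by omega)]
          omega
        have hb := twlen_pos l i h hodd
        set cnt := oddRunA l.length l i 0 with hcnt
        by_cases h1 : cnt = 1
        · rw [if_pos h1]
          have htw : ((l.drop i).takeWhile pyOdd).length = 1 := by omega
          have hlen : (l.take i).length = i := by simp; omega
          have herase : l.eraseIdx i = l.take i ++ l.drop (i + 1) :=
            List.eraseIdx_eq_take_drop_succ l i
          rw [ih (l.eraseIdx i) i (by rw [herase, List.length_append, hlen]; omega)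
            (by rw [herase, List.length_append, hlen]; simp; omega)]
          rw [herase, List.take_left' hlen, List.drop_left' hlen]
          rw [keep_drop_odd l i h hodd, htw]
          simp
        · rw [if_neg h1]
          by_cases h2 : cnt = 2
          · rw [if_pos h2]
            have htw : ((l.drop i).takeWhile pyOdd).length = 2 := by omega
            have hlen : (l.take i).length = i := by simp; omega
            have herase : l.eraseIdx i = l.take i ++ l.drop (i + 1) :=
              List.eraseIdx_eq_take_drop_succ l i
            have herase2 : (l.eraseIdx i).eraseIdx i = l.take i ++ l.drop (i + 2) := by
              rw [List.eraseIdx_eq_take_drop_succ, herase, List.take_left' hlen]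
              congr 1
              have h2' : i + 1 = (l.take i).length + 1 := by omega
              rw [h2', List.drop_append]
              simp [hlen]
            rw [ih ((l.eraseIdx i).eraseIdx i) i
              (by rw [herase2, List.length_append, hlen]; omega)
              (by rw [herase2, List.length_append, hlen]; simp; omega)]
            rw [herase2, List.take_left' hlen, List.drop_left' hlen]
            rw [keep_drop_odd l i h hodd, htw]
            simp
          · rw [if_neg h2]
            by_cases h3 : 2 < cnt
            · rw [if_pos h3]
              rw [ih l (i + cnt) (by omega) (by omega)]
              have hgt : 2 < ((l.drop i).takeWhile pyOdd).length := by omega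
              rw [keep_drop_odd l i h hodd, if_pos hgt, List.take_add, hc,
                take_length_takeWhile, List.append_assoc]
            · omega
      · rw [if_neg hodd]
        rw [ih l (i + 1) (by omega) (by omega)]
        have hd : l.drop i = l[i] :: l.drop (i + 1) := List.drop_eq_getElem_cons h
        conv_rhs => rw [hd, keep]
        simp only [hodd, Bool.false_eq_true, if_false]
        rw [List.take_add, List.take_one, List.drop_eq_getElem_cons h, List.head?_cons,
          Option.toList_some, List.append_assoc, List.singleton_append]
    · rw [dif_neg h]
      have hi : i = l.length := by omega
      subst hi
      rw [List.drop_eq_nil_iff.mpr (le_refl _), keep]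
      simp

theorem altLoopB_eq (fuel : Nat) : ∀ (l : List Int) (i : Nat) (res : List Int),
    i ≤ l.length → l.length ≤ i + fuel →
    altLoopB fuel l i res = res ++ keep (l.drop i) := by
  induction fuel with
  | zero =>
    intro l i res hle hf
    rw [altLoopB, List.drop_eq_nil_iff.mpr (by omega), keep]
    simp
  | succ fuel ih =>
    intro l i res hle hf
    rw [altLoopB]
    by_cases h : i < l.length
    · rw [dif_pos h]
      by_cases hodd : pyOdd l[i]
      · rw [if_pos hodd]
        have hb := twlen_pos l i h hodd
        have hj : scanEndB l.length l i = i + ((l.drop i).takeWhile pyOdd).length :=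
          scanEndB_eq l.length l i (by omega)
        set j := scanEndB l.length l i with hjdef
        have hti : j - i = ((l.drop i).takeWhile pyOdd).length := by omega
        have hrun : PySem.List.slice l (some (i : Int)) (some ((j : Nat) : Int)) =
            (l.drop i).takeWhile pyOdd := by
          rw [PySem.List.slice_natCast l i j, hti, take_length_takeWhile]
        rw [ih l j _ (by omega) (by omega), hrun, keep_drop_odd l i h hodd,
          show i + ((l.drop i).takeWhile pyOdd).length = j from hj.symm, hti]
        by_cases hgt : 2 < ((l.drop i).takeWhile pyOdd).length
        · rw [if_pos hgt, if_pos hgt, List.append_assoc]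
        · rw [if_neg hgt, if_neg hgt, List.nil_append]
      · rw [if_neg hodd]
        rw [ih l (i + 1) _ (by omega) (by omega)]
        have hd : l.drop i = l[i] :: l.drop (i + 1) := List.drop_eq_getElem_cons h
        conv_rhs => rw [hd, keep]
        simp only [hodd, Bool.false_eq_true, if_false]
        rw [List.append_assoc, List.singleton_append]
    · rw [dif_neg h]
      rw [List.drop_eq_nil_iff.mpr (by omega), keep]
      simp

-- ===== VERDICT (by name: the statement is the Claim_ definition above) =====
theorem algoritm1_spec : Claim_equal_algoritm1 := by
  intro nums_al _
  unfold Spec_algoritm1 algoritm1 algoritm1_alt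
  rw [algoLoopA_eq (nums_al.length + 1) nums_al 0 (by omega) (by omega),
    altLoopB_eq (nums_al.length + 1) nums_al 0 [] (by omega) (by omega)]
  simp
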